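-- pv_equiv track=rewrite | github.com/shivasubrahmanya/agent | agents/structure_agent.py | get_hierarchy_level
-- ===== SOURCE A (Python) =====
-- def get_hierarchy_level(role: str) -> str:
--     """Determine hierarchy level from role title."""
--     role_lower = role.lower()
--     if any(x in role_lower for x in ["ceo", "cto", "cfo", "coo", "cmo", "cro", "chief"]):
--         return "C-Suite"
--     elif any(x in role_lower for x in ["evp", "svp", "senior vice"]):
--         return "EVP/SVP"
--     elif any(x in role_lower for x in ["vp", "vice president"]):
--         return "VP"
--     elif any(x in role_lower for x in ["director", "head of"]):
--         return "Director"
--     elif any(x in role_lower for x in ["manager", "lead"]):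
--         return "Manager"
--     else:
--         return "Individual Contributor"
-- ===== SOURCE B (Python) =====
-- # B: flat keyword->rank scan computing the minimum matching rank, then index into labels.
-- _KEYWORD_RANKS = [
--     ("ceo", 0), ("cto", 0), ("cfo", 0), ("coo", 0), ("cmo", 0), ("cro", 0), ("chief", 0),
--     ("evp", 1), ("svp", 1), ("senior vice", 1),
--     ("vp", 2), ("vice president", 2),
--     ("director", 3), ("head of", 3),
--     ("manager", 4), ("lead", 4),
-- ]
-- _LABELS = ["C-Suite", "EVP/SVP", "VP", "Director", "Manager", "Individual Contributor"]
--
-- def get_hierarchy_level(role: str) -> str: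
--     """Determine hierarchy level: best (lowest) rank over all matching keywords."""
--     role_lower = role.lower()
--     best = 5
--     for kw, rank in _KEYWORD_RANKS:
--         if kw in role_lower and rank < best:
--             best = rank
--     return _LABELS[best]
-- ===== Notes on version B (the rewrite author's own statement) =====
-- stated objective: alternative
-- what changed: Instead of A's first-match if/elif cascade over keyword groups, B scans one flat keyword->rank list accumulating the minimum matching rank, then indexes a label array; equivalence holds because the label of the first matching group equals the label of the minimum matching rank.
import Mathlib
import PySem

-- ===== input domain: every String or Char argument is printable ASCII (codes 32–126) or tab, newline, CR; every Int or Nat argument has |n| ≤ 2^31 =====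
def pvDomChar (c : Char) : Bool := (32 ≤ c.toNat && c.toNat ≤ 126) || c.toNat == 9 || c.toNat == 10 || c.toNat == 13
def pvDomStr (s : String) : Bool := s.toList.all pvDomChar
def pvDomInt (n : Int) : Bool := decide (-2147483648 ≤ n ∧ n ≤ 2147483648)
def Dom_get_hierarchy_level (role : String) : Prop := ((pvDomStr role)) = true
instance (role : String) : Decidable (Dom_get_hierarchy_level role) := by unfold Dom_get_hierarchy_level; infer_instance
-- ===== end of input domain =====

-- B replaces A's first-match if/elif cascade by a min-rank scan over one flat keyword->rank list plus a label lookup (alternative, same cost).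

-- ===== PORT A =====
def get_hierarchy_level (role : String) : String :=
  let role_lower := PySem.Str.lower role
  if ["ceo", "cto", "cfo", "coo", "cmo", "cro", "chief"].any (fun x => PySem.Str.isIn x role_lower) then "C-Suite"
  else if ["evp", "svp", "senior vice"].any (fun x => PySem.Str.isIn x role_lower) then "EVP/SVP"
  else if ["vp", "vice president"].any (fun x => PySem.Str.isIn x role_lower) then "VP"
  else if ["director", "head of"].any (fun x => PySem.Str.isIn x role_lower) then "Director"
  else if ["manager", "lead"].any (fun x => PySem.Str.isIn x role_lower) then "Manager"
  else "Individual Contributor"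

-- ===== PORT B =====
def keywordRanks : List (String × Int) :=
  [("ceo", 0), ("cto", 0), ("cfo", 0), ("coo", 0), ("cmo", 0), ("cro", 0), ("chief", 0),
   ("evp", 1), ("svp", 1), ("senior vice", 1),
   ("vp", 2), ("vice president", 2),
   ("director", 3), ("head of", 3),
   ("manager", 4), ("lead", 4)]

def hierarchyLabels : List String :=
  ["C-Suite", "EVP/SVP", "VP", "Director", "Manager", "Individual Contributor"]

def get_hierarchy_level_alt (role : String) : String :=
  let role_lower := PySem.Str.lower role
  let best := keywordRanks.foldl
    (fun b p => if PySem.Str.isIn p.1 role_lower && decide (p.2 < b) then p.2 else b) 5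
  -- _LABELS[best]: best is always in 0..5, so the lookup never fails; .getD "" only discharges the Option
  (PySem.List.pyGet? hierarchyLabels best).getD ""

-- ===== PRECONDITION & SPEC =====
def Spec_get_hierarchy_level (role : String) (out : String) : Prop := out = get_hierarchy_level_alt role
instance (role : String) (out : String) : Decidable (Spec_get_hierarchy_level role out) := by unfold Spec_get_hierarchy_level; infer_instance

-- ===== CLAIM (what is proved, stated in full; the proofs are below) =====
def Claim_equal_get_hierarchy_level : Prop := ∀ (role : String), Dom_get_hierarchy_level role → Spec_get_hierarchy_level role (get_hierarchy_level role)

-- ===== LEMMAS AND PROOFS =====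

-- folding B's guarded-update over one group of keywords that all carry the same rank r
-- computes 'min acc r' when some keyword matches and keeps acc otherwise
theorem fold_group (rl : String) (r : Int) (kws : List String) (acc : Int) :
    (kws.map (fun k => (k, r))).foldl
      (fun b p => if PySem.Str.isIn p.1 rl && decide (p.2 < b) then p.2 else b) acc
    = if kws.any (fun k => PySem.Str.isIn k rl) then min acc r else acc := by
  induction kws generalizing acc with
  | nil => simp
  | cons k ks ih =>
    simp only [List.map_cons, List.foldl_cons, List.any_cons, ih]
    by_cases hk : PySem.Str.isIn k rl = true
    · simp only [hk, Bool.true_and, Bool.true_or]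
      by_cases hr : r < acc
      · simp only [decide_eq_true_eq, if_pos hr]
        split_ifs <;> omega
      · simp only [decide_eq_true_eq, if_neg hr]
        split_ifs <;> omega
    · simp only [hk, Bool.false_and, Bool.false_or, Bool.false_eq_true, if_false]

theorem get_hierarchy_level_spec : Claim_equal_get_hierarchy_level := by
  intro role _
  unfold Spec_get_hierarchy_level
  simp only [get_hierarchy_level, get_hierarchy_level_alt]
  have hsplit : keywordRanks =
      (["ceo", "cto", "cfo", "coo", "cmo", "cro", "chief"].map (fun k => (k, (0 : Int)))) ++
      (["evp", "svp", "senior vice"].map (fun k => (k, (1 : Int)))) ++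
      (["vp", "vice president"].map (fun k => (k, (2 : Int)))) ++
      (["director", "head of"].map (fun k => (k, (3 : Int)))) ++
      (["manager", "lead"].map (fun k => (k, (4 : Int)))) := by rfl
  rw [hsplit]
  simp only [List.foldl_append, fold_group]
  generalize (["ceo", "cto", "cfo", "coo", "cmo", "cro", "chief"].any fun x => PySem.Str.isIn x (PySem.Str.lower role)) = c1
  generalize (["evp", "svp", "senior vice"].any fun x => PySem.Str.isIn x (PySem.Str.lower role)) = c2
  generalize (["vp", "vice president"].any fun x => PySem.Str.isIn x (PySem.Str.lower role)) = c3
  generalize (["director", "head of"].any fun x => PySem.Str.isIn x (PySem.Str.lower role)) = c4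
  generalize (["manager", "lead"].any fun x => PySem.Str.isIn x (PySem.Str.lower role)) = c5
  cases c1 <;> cases c2 <;> cases c3 <;> cases c4 <;> cases c5 <;> rfl
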